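-- pv_equiv track=rewrite | github.com/VerbekeLab/GBDT_Graphs | src/methods/utils/paths.py | filter_subpaths
-- ===== SOURCE A (Python) =====
-- def filter_subpaths(paths):
--     """
--     Filter out paths that are entirely included in another path.
--
--     Args:
--     - paths (list of lists): A list where each sublist represents a path.
--
--     Returns:
--     - list: A filtered list of paths.
--     """
--     # Sort the paths by length
--     sorted_paths = sorted(paths, key=len)
--
--     filtered_paths = []
--
--     for i in range(len(sorted_paths)):
--         is_subpath = False
--         for j in range(i + 1, len(sorted_paths)):
--             # Check if the shorter path is a prefix of a longer path
--             if sorted_paths[i] == sorted_paths[j][:len(sorted_paths[i])]: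
--                 is_subpath = True
--                 break
--         if not is_subpath:
--             filtered_paths.append(sorted_paths[i])
--
--     return filtered_paths
-- ===== SOURCE B (Python) =====
-- def filter_subpaths(paths):
--     # One pass over a precomputed set of proper prefixes + an occurrence counter,
--     # instead of nested pairwise prefix scans.
--     prefixes = set()
--     for q in paths:
--         t = tuple(q)
--         for k in range(len(q)):
--             prefixes.add(t[:k])
--     remaining = {}
--     for p in paths:
--         t = tuple(p)
--         remaining[t] = remaining.get(t, 0) + 1
--     out = []
--     for p in sorted(paths, key=len):
--         t = tuple(p)
--         remaining[t] = remaining[t] - 1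
--         if remaining[t] == 0 and t not in prefixes:
--             out.append(p)
--     return out
-- ===== Notes on version B (the rewrite author's own statement) =====
-- stated objective: alternative
-- what changed: Replaces the nested pairwise prefix scan with one precomputed set of all proper prefixes plus an occurrence counter, deciding each length-sorted path by hash lookups instead of scanning the later paths.
import Mathlib
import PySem

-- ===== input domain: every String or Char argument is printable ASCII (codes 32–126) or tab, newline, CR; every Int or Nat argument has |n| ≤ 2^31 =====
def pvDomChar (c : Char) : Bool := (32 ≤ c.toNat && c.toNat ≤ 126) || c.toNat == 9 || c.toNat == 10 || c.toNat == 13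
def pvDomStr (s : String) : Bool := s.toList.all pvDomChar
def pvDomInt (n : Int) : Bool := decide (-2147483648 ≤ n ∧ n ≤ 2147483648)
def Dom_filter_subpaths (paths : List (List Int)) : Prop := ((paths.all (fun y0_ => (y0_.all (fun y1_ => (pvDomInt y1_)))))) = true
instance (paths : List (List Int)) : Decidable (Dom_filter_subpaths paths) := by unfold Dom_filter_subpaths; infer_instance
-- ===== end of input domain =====

-- B replaces A's nested pairwise prefix scan with one precomputed set of all proper
-- prefixes plus an occurrence counter over the length-sorted list (alternative algorithm).


-- ===== PORT A =====
-- inner loop: for j in range(i+1, len(sorted_paths)): if sorted_paths[i] == sorted_paths[j][:len(sorted_paths[i])]: break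
def aIsSubpathLoop (srt : List (List Int)) (p : List Int) (j : Nat) : Bool :=
  if h : j < srt.length then
    if p == PySem.List.slice srt[j] none (some (p.length : Int)) then true
    else aIsSubpathLoop srt p (j + 1)
  else false
termination_by srt.length - j

-- outer loop: for i in range(len(sorted_paths)): … append sorted_paths[i] when not is_subpath
def aLoop (srt : List (List Int)) (i : Nat) : List (List Int) :=
  if h : i < srt.length then
    if aIsSubpathLoop srt srt[i] (i + 1) then aLoop srt (i + 1)
    else srt[i] :: aLoop srt (i + 1)
  else []
termination_by srt.length - i

def filter_subpaths (paths : List (List Int)) : List (List Int) :=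
  aLoop (PySem.List.sorted paths (fun p => p.length) false) 0

-- ===== PORT B =====
-- prefixes = { q[:k] for q in paths for k in range(len(q)) }
def bPrefixes (paths : List (List Int)) : PySem.Set (List Int) :=
  paths.foldl
    (fun s q =>
      (PySem.List.pyRange 0 (q.length : Int) 1).foldl
        (fun s k => PySem.Set.add s (PySem.List.slice q none (some k))) s)
    PySem.Set.empty

-- remaining[t] = remaining.get(t, 0) + 1
def bCounter (paths : List (List Int)) : PySem.Dict (List Int) Int :=
  paths.foldl (fun d p => d.insert p (d.getD p 0 + 1)) PySem.Dict.empty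

-- for p in sorted(paths, key=len): decrement; keep the last occurrence unless a proper prefix
def bLoop (pref : PySem.Set (List Int)) : PySem.Dict (List Int) Int → List (List Int) → List (List Int)
  | _, [] => []
  | d, p :: rest =>
    let d' := d.insert p (d.getD p 0 - 1)
    if d'.getD p 0 == 0 && !(PySem.Set.contains pref p) then p :: bLoop pref d' rest
    else bLoop pref d' rest

def filter_subpaths_alt (paths : List (List Int)) : List (List Int) :=
  bLoop (bPrefixes paths) (bCounter paths) (PySem.List.sorted paths (fun p => p.length) false)

-- ===== PRECONDITION & SPEC =====
def Spec_filter_subpaths (paths : List (List Int)) (out : List (List Int)) : Prop := out = filter_subpaths_alt paths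
instance (paths : List (List Int)) (out : List (List Int)) : Decidable (Spec_filter_subpaths paths out) := by unfold Spec_filter_subpaths; infer_instance

-- ===== CLAIM (what is proved, stated in full; the proofs are below) =====
def Claim_equal_filter_subpaths : Prop := ∀ (paths : List (List Int)), Dom_filter_subpaths paths → Spec_filter_subpaths paths (filter_subpaths paths)

-- ===== LEMMAS AND PROOFS =====

-- shared reference form of both programs: keep p unless some later path has p as a prefix
def anyPref (p : List Int) (l : List (List Int)) : Bool :=
  l.any (fun q => p == q.take p.length)

def go : List (List Int) → List (List Int)
  | [] => []
  | p :: rest => if anyPref p rest then go rest else p :: go rest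

lemma aIsSubpathLoop_eq (srt : List (List Int)) (p : List Int) (j : Nat) :
    aIsSubpathLoop srt p j = anyPref p (srt.drop j) := by
  unfold aIsSubpathLoop
  split
  · rename_i h
    rw [List.drop_eq_getElem_cons h]
    rw [aIsSubpathLoop_eq srt p (j+1)]
    rw [PySem.List.slice_to_natCast]
    simp only [anyPref, List.any_cons]
    cases hb : (p == (srt[j]'h).take p.length)
    · simp [hb]
    · simp [hb]
  · rename_i h
    rw [List.drop_eq_nil_of_le (by omega)]
    simp [anyPref]
termination_by srt.length - j

lemma aLoop_eq (srt : List (List Int)) (i : Nat) :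
    aLoop srt i = go (srt.drop i) := by
  unfold aLoop
  split
  · rename_i h
    rw [List.drop_eq_getElem_cons h, aLoop_eq srt (i+1), aIsSubpathLoop_eq]
    simp only [go]
  · rename_i h
    rw [List.drop_eq_nil_of_le (by omega)]
    simp [go]
termination_by srt.length - i

lemma mem_foldl_add {α : Type} (f : α → List Int) (l : List α) (s : PySem.Set (List Int)) (y : List Int) :
    (y ∈ l.foldl (fun s x => PySem.Set.add s (f x)) s) ↔ y ∈ s ∨ ∃ x ∈ l, y = f x := by
  induction l generalizing s with
  | nil => simp
  | cons a t ih =>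
    simp only [List.foldl_cons, ih, PySem.Set.mem_add, List.mem_cons]
    constructor
    · rintro (⟨hy | hy⟩ | ⟨x, hx, rfl⟩)
      · exact Or.inl hy
      · exact Or.inr ⟨a, Or.inl rfl, hy⟩
      · exact Or.inr ⟨x, Or.inr hx, rfl⟩
    · rintro (hy | ⟨x, (rfl | hx), rfl⟩)
      · exact Or.inl (Or.inl hy)
      · exact Or.inl (Or.inr rfl)
      · exact Or.inr ⟨x, hx, rfl⟩

lemma mem_bPrefixes_aux (paths : List (List Int)) (s : PySem.Set (List Int)) (y : List Int) :
    (y ∈ paths.foldl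
      (fun s q =>
        (PySem.List.pyRange 0 (q.length : Int) 1).foldl
          (fun s k => PySem.Set.add s (PySem.List.slice q none (some k))) s) s)
    ↔ y ∈ s ∨ ∃ q ∈ paths, ∃ k : Int, k ∈ PySem.List.pyRange 0 (q.length : Int) 1 ∧
        y = PySem.List.slice q none (some k) := by
  induction paths generalizing s with
  | nil => simp
  | cons a t ih =>
    simp only [List.foldl_cons, ih, mem_foldl_add, List.mem_cons]
    constructor
    · rintro (⟨hy | ⟨k, hk, rfl⟩⟩ | ⟨q, hq, k, hk, rfl⟩)
      · exact Or.inl hy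
      · exact Or.inr ⟨a, Or.inl rfl, k, hk, rfl⟩
      · exact Or.inr ⟨q, Or.inr hq, k, hk, rfl⟩
    · rintro (hy | ⟨q, (rfl | hq), k, hk, rfl⟩)
      · exact Or.inl (Or.inl hy)
      · exact Or.inl (Or.inr ⟨k, hk, rfl⟩)
      · exact Or.inr ⟨q, hq, k, hk, rfl⟩

lemma mem_bPrefixes (paths : List (List Int)) (p : List Int) :
    p ∈ bPrefixes paths ↔ ∃ q ∈ paths, p.length < q.length ∧ q.take p.length = p := by
  unfold bPrefixes
  rw [mem_bPrefixes_aux]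
  simp only [PySem.Set.empty, List.not_mem_nil, false_or]
  constructor
  · rintro ⟨q, hq, k, hk, rfl⟩
    rw [PySem.List.mem_pyRange_one] at hk
    rw [PySem.List.slice_to q hk.1]
    have hklt : k.toNat < q.length := by omega
    refine ⟨q, hq, ?_, ?_⟩
    · simp [List.length_take]; omega
    · congr 1
      simp [List.length_take]; omega
  · rintro ⟨q, hq, hlt, htake⟩
    refine ⟨q, hq, (p.length : Int), ?_, ?_⟩
    · rw [PySem.List.mem_pyRange_one]; omega
    · rw [PySem.List.slice_to q (by positivity)]
      simp [htake]

lemma anyPref_iff (p : List Int) (l : List (List Int)) :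
    anyPref p l = true ↔ p ∈ l ∨ ∃ q ∈ l, p.length < q.length ∧ q.take p.length = p := by
  simp only [anyPref, List.any_eq_true, beq_iff_eq]
  constructor
  · rintro ⟨q, hq, hpe⟩
    rcases lt_trichotomy p.length q.length with h | h | h
    · exact Or.inr ⟨q, hq, h, hpe.symm⟩
    · left
      have : q.take p.length = q := List.take_of_length_le (by omega)
      rw [this] at hpe; exact hpe ▸ hq
    · exfalso
      have : q.take p.length = q := List.take_of_length_le (by omega)
      rw [this] at hpe
      have := congrArg List.length hpe
      omega
  · rintro (hp | ⟨q, hq, hlt, htake⟩)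
    · exact ⟨p, hp, (List.take_of_length_le (le_refl _)).symm⟩
    · exact ⟨q, hq, htake.symm⟩

lemma bLoop_eq_go (paths : List (List Int)) : ∀ (l : List (List Int)) (d : PySem.Dict (List Int) Int),
    (∀ t, d.getD t 0 = (l.count t : Int)) →
    l.Pairwise (fun a b => a.length ≤ b.length) →
    (∀ q ∈ paths, q ∉ l → ∀ p ∈ l, q.length ≤ p.length) →
    (∀ p ∈ l, p ∈ paths) →
    bLoop (bPrefixes paths) d l = go l
  | [], _, _, _, _, _ => rfl
  | p :: rest, d, hc, hpw, hout, hsub => by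
    rw [List.pairwise_cons] at hpw
    obtain ⟨hhead, hpw'⟩ := hpw
    have hd' : ∀ t, (d.insert p (d.getD p 0 - 1)).getD t 0 = (rest.count t : Int) := by
      intro t
      by_cases ht : t = p
      · subst ht
        rw [PySem.Dict.getD_insert_self, hc t, List.count_cons_self]
        push_cast; ring
      · rw [PySem.Dict.getD_insert_of_ne d _ _ ht, hc t]
        simp [Ne.symm ht]
    -- the fact the proof turns on: on the length-sorted remainder, "p is a prefix of a
    -- later path" can be tested against the global prefix set and the remaining count
    have hiff : anyPref p rest = true ↔ (p ∈ rest ∨ p ∈ bPrefixes paths) := by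
      rw [anyPref_iff, mem_bPrefixes]
      constructor
      · rintro (hp | ⟨q, hq, hlt, htk⟩)
        · exact Or.inl hp
        · exact Or.inr ⟨q, hsub q (List.mem_cons_of_mem _ hq), hlt, htk⟩
      · rintro (hp | ⟨q, hq, hlt, htk⟩)
        · exact Or.inl hp
        · right
          by_cases hql : q ∈ p :: rest
          · rcases List.mem_cons.mp hql with rfl | hqr
            · omega
            · exact ⟨q, hqr, hlt, htk⟩
          · exact absurd (hout q hq hql p (List.mem_cons_self)) (by omega)
    have hcond : ((d.insert p (d.getD p 0 - 1)).getD p 0 == 0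
        && !(PySem.Set.contains (bPrefixes paths) p)) = !(anyPref p rest) := by
      rw [hd' p]
      cases hAny : anyPref p rest
      · have hx : ¬ (p ∈ rest ∨ p ∈ bPrefixes paths) := fun h => by
          rw [hiff.mpr h] at hAny; exact Bool.true_eq_false.mp hAny
        rw [not_or] at hx
        have h2 : PySem.Set.contains (bPrefixes paths) p = false :=
          Bool.eq_false_iff.mpr (fun h => hx.2 ((PySem.Set.contains_iff _ _).mp h))
        rw [h2, List.count_eq_zero.mpr hx.1]
        simp
      · rcases hiff.mp hAny with hp | hp
        · have : rest.count p ≠ 0 := by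
            rw [ne_eq, List.count_eq_zero]; exact fun h => h hp
          simp only [Bool.not_true]
          simp only [Bool.and_eq_false_iff, beq_eq_false_iff_ne, ne_eq]
          left
          exact_mod_cast this
        · rw [(PySem.Set.contains_iff _ _).mpr hp]
          simp
    have hout' : ∀ q ∈ paths, q ∉ rest → ∀ p' ∈ rest, q.length ≤ p'.length := by
      intro q hq hqr p' hp'
      by_cases hql : q ∈ p :: rest
      · rcases List.mem_cons.mp hql with rfl | h
        · exact hhead p' hp'
        · exact absurd h hqr
      · exact hout q hq hql p' (List.mem_cons_of_mem _ hp')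
    have hsub' : ∀ p' ∈ rest, p' ∈ paths := fun p' h => hsub p' (List.mem_cons_of_mem _ h)
    show (if _ then _ else _) = go (p :: rest)
    rw [hcond, bLoop_eq_go paths rest _ hd' hpw' hout' hsub']
    simp only [go]
    cases anyPref p rest <;> simp

-- ===== VERDICT (by name: the statement is the Claim_ definition above) =====
theorem filter_subpaths_spec : Claim_equal_filter_subpaths := by
  intro paths _
  unfold Spec_filter_subpaths filter_subpaths filter_subpaths_alt
  rw [aLoop_eq, List.drop_zero]
  rw [bLoop_eq_go paths _ (bCounter paths) ?hc ?hpw ?hout ?hsub]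
  case hc =>
    intro t
    unfold bCounter
    rw [PySem.Dict.getD_foldl_insert_add_one]
    have : (PySem.List.sorted paths (fun p => p.length) false).count t = paths.count t :=
      (PySem.List.sorted_perm paths _ _).count_eq t
    simp [this]
  case hpw => exact PySem.List.sorted_pairwise paths _
  case hout =>
    intro q hq hql
    exact absurd ((PySem.List.mem_sorted _ _ _ _).mpr hq) hql
  case hsub =>
    intro p hp
    exact (PySem.List.mem_sorted _ _ _ _).mp hp
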